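-- pv_equiv track=rewrite | github.com/Pandicon/Multiplayer-Game | server/boardGenerator.py | spinCoords
-- ===== SOURCE A (Python) =====
-- def spinCoords(input: list, spin: int) -> list:
-- 	max = 7
-- 	x = input[0]
-- 	y = input[1]
-- 	for i in range(spin%4):
-- 		tempX = x
-- 		x = max-y
-- 		y = tempX
-- 	return [x, y]
-- ===== SOURCE B (Python) =====
-- def spinCoords(input: list, spin: int) -> list:
-- 	x, y = input[0], input[1]
-- 	s = spin % 4
-- 	if s == 1:
-- 		return [7 - y, x]
-- 	if s == 2:
-- 		return [7 - x, 7 - y]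
-- 	if s == 3:
-- 		return [y, 7 - x]
-- 	return [x, y]
-- ===== Notes on version B (the rewrite author's own statement) =====
-- stated objective: simpler
-- what changed: Replaced the iterated-rotation loop over range(spin%4) with a direct closed-form selection of one of the four possible rotated coordinates keyed on spin%4.
import Mathlib
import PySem

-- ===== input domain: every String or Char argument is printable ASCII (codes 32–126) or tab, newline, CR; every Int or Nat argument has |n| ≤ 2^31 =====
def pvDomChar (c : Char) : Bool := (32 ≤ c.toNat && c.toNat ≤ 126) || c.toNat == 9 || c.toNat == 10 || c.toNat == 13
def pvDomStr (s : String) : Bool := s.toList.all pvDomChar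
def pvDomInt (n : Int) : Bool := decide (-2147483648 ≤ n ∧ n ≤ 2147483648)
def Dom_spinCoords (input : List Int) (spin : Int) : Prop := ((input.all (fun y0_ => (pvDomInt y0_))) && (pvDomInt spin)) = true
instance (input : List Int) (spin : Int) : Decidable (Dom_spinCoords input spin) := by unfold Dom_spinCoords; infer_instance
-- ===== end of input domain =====

-- B replaces A's repeated-rotation loop by a closed-form selection on spin % 4 (simpler).

-- ===== PORT A =====
def spinCoords (input : List Int) (spin : Int) : List Int :=
  let max : Int := 7
  let x := PySem.List.pyGetD input 0 0   -- input[0]; in range under Pre_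
  let y := PySem.List.pyGetD input 1 0   -- input[1]; in range under Pre_
  let p := (PySem.List.pyRange 0 (PySem.Int.mod spin 4) 1).foldl
    (fun (st : Int × Int) _ => (max - st.2, st.1)) (x, y)
  [p.1, p.2]

-- ===== PORT B =====
def spinCoords_alt (input : List Int) (spin : Int) : List Int :=
  let x := PySem.List.pyGetD input 0 0   -- input[0]; in range under Pre_
  let y := PySem.List.pyGetD input 1 0   -- input[1]; in range under Pre_
  let s := PySem.Int.mod spin 4
  if s = 1 then [7 - y, x]
  else if s = 2 then [7 - x, 7 - y]
  else if s = 3 then [y, 7 - x]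
  else [x, y]

-- ===== PRECONDITION & SPEC =====
-- Pre_: both Pythons raise IndexError on lists with fewer than two elements.
def Pre_spinCoords (input : List Int) (spin : Int) : Prop := 2 ≤ input.length
instance (input : List Int) (spin : Int) : Decidable (Pre_spinCoords input spin) := by unfold Pre_spinCoords; infer_instance
def pvWitness_spinCoords : List Int × Int := ([3, 5], 6)

def Spec_spinCoords (input : List Int) (spin : Int) (out : List Int) : Prop := out = spinCoords_alt input spin
instance (input : List Int) (spin : Int) (out : List Int) : Decidable (Spec_spinCoords input spin out) := by unfold Spec_spinCoords; infer_instance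

-- ===== CLAIM =====
def Claim_equal_spinCoords : Prop := ∀ (input : List Int) (spin : Int), Dom_spinCoords input spin → Pre_spinCoords input spin → Spec_spinCoords input spin (spinCoords input spin)

-- ===== LEMMAS AND PROOFS =====
theorem range1 : PySem.List.pyRange 0 1 1 = [(0 : Int)] := by decide
theorem range2 : PySem.List.pyRange 0 2 1 = [(0 : Int), 1] := by decide
theorem range3 : PySem.List.pyRange 0 3 1 = [(0 : Int), 1, 2] := by decide

-- ===== VERDICT =====
theorem spinCoords_spec : Claim_equal_spinCoords := by
  intro input spin _ _
  unfold Spec_spinCoords spinCoords spinCoords_alt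
  have he : PySem.Int.mod spin 4 = spin % 4 := PySem.Int.mod_eq_emod_of_pos (by norm_num)
  have h0 : (0 : Int) ≤ PySem.Int.mod spin 4 := by rw [he]; exact Int.emod_nonneg spin (by norm_num)
  have h4 : PySem.Int.mod spin 4 < 4 := by rw [he]; exact Int.emod_lt_of_pos spin (by norm_num)
  interval_cases h : PySem.Int.mod spin 4 <;>
    simp [range1, range2, range3, List.foldl]
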